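-- pv_equiv track=rewrite | github.com/filipefalcaofs/manualmakerai | manual_maker_ai/mcp_maker/enterprise.py | infer_component_type
-- ===== SOURCE A (Python) =====
-- _TIPO_COMPONENTE_POR_SUFIXO: dict[str, str] = {
--     "_COD": "E", "_CODIGO": "E",
--     "_NOME": "E", "_RAZAO": "E", "_FANTASIA": "E",
--     "_EMAIL": "E", "_MAIL": "E",
--     "_OBS": "M", "_OBSERVACAO": "M", "_DESCRICAO": "M",
--     "_ATIVO": "R", "_STATUS": "C", "_TIPO": "C", "_SITUACAO": "C",
--     "_UF": "C",
-- }
--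
-- def infer_component_type(campo: str, tipo_dado_sql: str = "") -> str:
--     """Infere COM_TIPO baseado no nome do campo e tipo SQL."""
--     campo_upper = campo.upper()
--     for suffix, comp_type in _TIPO_COMPONENTE_POR_SUFIXO.items():
--         if campo_upper.endswith(suffix):
--             return comp_type
--     if tipo_dado_sql in ("text", "ntext"):
--         return "M"
--     if tipo_dado_sql == "bit":
--         return "H"
--     return "E"
-- ===== SOURCE B (Python) =====
-- _TIPO_COMPONENTE_POR_SUFIXO: dict[str, str] = {
--     "_COD": "E", "_CODIGO": "E",
--     "_NOME": "E", "_RAZAO": "E", "_FANTASIA": "E",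
--     "_EMAIL": "E", "_MAIL": "E",
--     "_OBS": "M", "_OBSERVACAO": "M", "_DESCRICAO": "M",
--     "_ATIVO": "R", "_STATUS": "C", "_TIPO": "C", "_SITUACAO": "C",
--     "_UF": "C",
-- }
--
-- def infer_component_type(campo: str, tipo_dado_sql: str = "") -> str:
--     """Infere COM_TIPO: one dict lookup on the last-underscore suffix instead of
--     scanning all suffixes with endswith."""
--     head, sep, tail = campo.upper().rpartition("_")
--     if sep:
--         comp = _TIPO_COMPONENTE_POR_SUFIXO.get(sep + tail)
--         if comp is not None:
--             return comp
--     if tipo_dado_sql in ("text", "ntext"):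
--         return "M"
--     if tipo_dado_sql == "bit":
--         return "H"
--     return "E"
-- ===== Notes on version B (the rewrite author's own statement) =====
-- stated objective: alternative
-- what changed: Replaces the ordered endswith scan over all 15 suffix keys by rpartition at the last underscore followed by a single dict lookup on the reconstructed suffix key.
import Mathlib
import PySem

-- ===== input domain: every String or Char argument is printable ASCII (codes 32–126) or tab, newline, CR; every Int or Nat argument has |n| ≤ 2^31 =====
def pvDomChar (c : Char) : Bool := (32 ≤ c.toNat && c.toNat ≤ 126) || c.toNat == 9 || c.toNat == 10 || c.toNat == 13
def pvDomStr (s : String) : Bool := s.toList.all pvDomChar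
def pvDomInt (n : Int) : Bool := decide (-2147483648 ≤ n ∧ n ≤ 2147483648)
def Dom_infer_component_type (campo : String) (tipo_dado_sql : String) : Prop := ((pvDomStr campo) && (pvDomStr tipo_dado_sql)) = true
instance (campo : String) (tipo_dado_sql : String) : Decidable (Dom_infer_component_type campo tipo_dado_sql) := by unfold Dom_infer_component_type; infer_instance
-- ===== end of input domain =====

-- B replaces A's ordered endswith scan over all suffix keys by rpartition at the
-- last underscore plus a single dict lookup (objective: alternative decomposition).

-- ===== PORT A =====
-- module-level dict _TIPO_COMPONENTE_POR_SUFIXO (shared by both versions, as in Python)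
def tipoDict : PySem.Dict String String := PySem.Dict.ofList
  [("_COD", "E"), ("_CODIGO", "E"),
   ("_NOME", "E"), ("_RAZAO", "E"), ("_FANTASIA", "E"),
   ("_EMAIL", "E"), ("_MAIL", "E"),
   ("_OBS", "M"), ("_OBSERVACAO", "M"), ("_DESCRICAO", "M"),
   ("_ATIVO", "R"), ("_STATUS", "C"), ("_TIPO", "C"), ("_SITUACAO", "C"),
   ("_UF", "C")]

-- the 'for suffix, comp_type in ….items(): if campo_upper.endswith(suffix): return comp_type' loop
def scanSuffixes (campo_upper : String) : List (String × String) → Option String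
  | [] => none
  | (suffix, comp_type) :: rest =>
      if PySem.Str.endswith campo_upper suffix then some comp_type
      else scanSuffixes campo_upper rest

def infer_component_type (campo : String) (tipo_dado_sql : String) : String :=
  let campo_upper := PySem.Str.upper campo
  match scanSuffixes campo_upper tipoDict.items with
  | some comp_type => comp_type
  | none =>
      if tipo_dado_sql = "text" ∨ tipo_dado_sql = "ntext" then "M"
      else if tipo_dado_sql = "bit" then "H"
      else "E"

-- ===== PORT B =====
-- hand port of str.rpartition("_") on code points (exact for the 1-char separator '_'):
-- (head, sep, tail); sep = "_" iff '_' occurs, tail = chars after the LAST '_'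
def rpartitionUnd (s : List Char) : List Char × List Char × List Char :=
  if '_' ∈ s then
    (((s.reverse.dropWhile (· ≠ '_')).drop 1).reverse, ['_'],
     (s.reverse.takeWhile (· ≠ '_')).reverse)
  else ([], [], s)

def infer_component_type_alt (campo : String) (tipo_dado_sql : String) : String :=
  let parts := rpartitionUnd (PySem.Str.upper campo).toList
  let sep := parts.2.1
  let tail := parts.2.2
  match (if sep ≠ [] then tipoDict.get? (String.ofList (sep ++ tail)) else none) with
  | some comp => comp
  | none =>
      if tipo_dado_sql = "text" ∨ tipo_dado_sql = "ntext" then "M"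
      else if tipo_dado_sql = "bit" then "H"
      else "E"

-- ===== PRECONDITION & SPEC =====
def Spec_infer_component_type (campo : String) (tipo_dado_sql : String) (out : String) : Prop := out = infer_component_type_alt campo tipo_dado_sql
instance (campo : String) (tipo_dado_sql : String) (out : String) : Decidable (Spec_infer_component_type campo tipo_dado_sql out) := by unfold Spec_infer_component_type; infer_instance

-- ===== CLAIM (what is proved, stated in full; the proofs are below) =====
def Claim_equal_infer_component_type : Prop := ∀ (campo : String) (tipo_dado_sql : String), Dom_infer_component_type campo tipo_dado_sql → Spec_infer_component_type campo tipo_dado_sql (infer_component_type campo tipo_dado_sql)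

-- ===== LEMMAS AND PROOFS =====

-- p ++ ['_'] is a prefix of r (p underscore-free) iff '_' occurs in r and p is
-- exactly the underscore-free head of r
theorem takeWhile_und_cons (c : Char) (l : List Char) (hc : c ≠ '_') :
    List.takeWhile (fun x => decide (x ≠ '_')) (c :: l)
      = c :: List.takeWhile (fun x => decide (x ≠ '_')) l := by
  rw [List.takeWhile_cons, if_pos (by simpa using hc)]

theorem takeWhile_und_cons_self (l : List Char) :
    List.takeWhile (fun x => decide (x ≠ '_')) ('_' :: l) = [] := by
  rw [List.takeWhile_cons, if_neg (by simp)]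

theorem prefix_underscore_iff (r p : List Char) (hp : ∀ c ∈ p, c ≠ '_') :
    (p ++ ['_'] <+: r) ↔ ('_' ∈ r ∧ p = r.takeWhile (· ≠ '_')) := by
  induction r generalizing p with
  | nil =>
      simp only [List.prefix_nil, List.append_eq_nil_iff]
      simp
  | cons c r' ih =>
      by_cases hc : c = '_'
      · subst hc
        rw [takeWhile_und_cons_self]
        constructor
        · intro h
          match p, hp with
          | [], _ => simp
          | q :: p', hp =>
              exfalso
              have hq : q = '_' := (List.cons_prefix_cons.mp h).1
              exact hp q (by simp) hq
        · rintro ⟨-, hpe⟩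
          subst hpe
          simp
      · rw [takeWhile_und_cons c r' hc]
        constructor
        · intro h
          match p, hp with
          | [], _ =>
              exfalso
              have hq : '_' = c := by simpa using h
              exact hc hq.symm
          | q :: p', hp =>
              obtain ⟨rfl, htl⟩ := List.cons_prefix_cons.mp h
              have ihr := (ih p' (fun x hx => hp x (by simp [hx]))).mp htl
              exact ⟨by simp [ihr.1], by rw [ihr.2]⟩
        · rintro ⟨hin, hpe⟩
          have hin' : '_' ∈ r' := by
            rcases List.mem_cons.mp hin with h | h
            · exact absurd h.symm hc
            · exact h
          subst hpe
          refine List.cons_prefix_cons.mpr ⟨rfl, ?_⟩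
          exact (ih _ (fun x hx => hp x (List.mem_cons_of_mem c hx))).mpr ⟨hin', rfl⟩

-- tail after the last underscore of u
def tailOf (u : List Char) : List Char := (u.reverse.takeWhile (· ≠ '_')).reverse

-- String equality against a built string is list equality
theorem beq_mk (s : String) (l : List Char) : (s == String.ofList l) = (s.toList == l) := by
  rcases h : s.toList == l with _ | _
  · simp only [beq_eq_false_iff_ne] at h ⊢
    intro he
    exact h (by simp [he])
  · simp only [beq_iff_eq] at h ⊢
    rw [String.ext_iff]
    simpa using h

theorem endswith_key (u : List Char) (key : String) (k' : List Char)
    (hk : key.toList = '_' :: k') (hfree : ∀ c ∈ k', c ≠ '_') :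
    PySem.Chars.endswith u key.toList
      = ('_' ∈ u && (key == String.ofList ('_' :: tailOf u))) := by
  have hbeq : (key == String.ofList ('_' :: tailOf u)) = decide (k' = tailOf u) := by
    rw [beq_mk, hk]
    rcases h : decide (k' = tailOf u) with _ | _
    · simp only [decide_eq_false_iff_not] at h
      simp [h]
    · simp only [decide_eq_true_eq] at h
      simp [h]
  rw [hbeq, hk]
  have hchar : ('_' :: k') <:+ u ↔ '_' ∈ u ∧ k' = tailOf u := by
    rw [← List.reverse_prefix]
    have hrw : ('_' :: k').reverse = k'.reverse ++ ['_'] := by simp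
    rw [hrw, prefix_underscore_iff u.reverse k'.reverse
      (fun c hc => hfree c (by simpa using hc))]
    constructor
    · rintro ⟨h1, h2⟩
      refine ⟨by simpa using h1, ?_⟩
      have := congrArg List.reverse h2
      simpa [tailOf] using this
    · rintro ⟨h1, h2⟩
      refine ⟨by simpa using h1, ?_⟩
      rw [h2]
      simp [tailOf]
  rcases h : PySem.Chars.endswith u ('_' :: k') with _ | _
  · symm
    rw [Bool.and_eq_false_iff]
    have hns : ¬ (('_' :: k') <:+ u) := by
      intro hs
      rw [← PySem.Chars.endswith_iff u ('_' :: k')] at hs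
      rw [h] at hs
      exact Bool.false_ne_true hs
    rw [hchar] at hns
    by_cases hm : '_' ∈ u
    · right
      simp only [decide_eq_false_iff_not]
      intro he
      exact hns ⟨hm, he⟩
    · left; simpa using hm
  · have hs := (PySem.Chars.endswith_iff u ('_' :: k')).mp h
    rw [hchar] at hs
    symm
    rw [Bool.and_eq_true]
    exact ⟨by simpa using hs.1, by simpa using hs.2⟩

-- ===== VERDICT (by name: the statement is the Claim_ definition above) =====
set_option maxRecDepth 10000 in
set_option maxHeartbeats 2000000 in
theorem infer_component_type_spec : Claim_equal_infer_component_type := by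
  intro campo tipo_dado_sql _
  unfold Spec_infer_component_type infer_component_type infer_component_type_alt rpartitionUnd
  have hmk : tipoDict = PySem.Dict.mk
    [("_COD", "E"), ("_CODIGO", "E"),
     ("_NOME", "E"), ("_RAZAO", "E"), ("_FANTASIA", "E"),
     ("_EMAIL", "E"), ("_MAIL", "E"),
     ("_OBS", "M"), ("_OBSERVACAO", "M"), ("_DESCRICAO", "M"),
     ("_ATIVO", "R"), ("_STATUS", "C"), ("_TIPO", "C"), ("_SITUACAO", "C"),
     ("_UF", "C")] := by decide
  set u := (PySem.Str.upper campo).toList with hu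
  simp only [hmk, PySem.Dict.get?_mk_cons, scanSuffixes,
    PySem.Str.endswith_eq]
  rw [endswith_key u "_COD" "COD".toList (by simp) (by simp),
      endswith_key u "_CODIGO" "CODIGO".toList (by simp) (by simp),
      endswith_key u "_NOME" "NOME".toList (by simp) (by simp),
      endswith_key u "_RAZAO" "RAZAO".toList (by simp) (by simp),
      endswith_key u "_FANTASIA" "FANTASIA".toList (by simp) (by simp),
      endswith_key u "_EMAIL" "EMAIL".toList (by simp) (by simp),
      endswith_key u "_MAIL" "MAIL".toList (by simp) (by simp),
      endswith_key u "_OBS" "OBS".toList (by simp) (by simp),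
      endswith_key u "_OBSERVACAO" "OBSERVACAO".toList (by simp) (by simp),
      endswith_key u "_DESCRICAO" "DESCRICAO".toList (by simp) (by simp),
      endswith_key u "_ATIVO" "ATIVO".toList (by simp) (by simp),
      endswith_key u "_STATUS" "STATUS".toList (by simp) (by simp),
      endswith_key u "_TIPO" "TIPO".toList (by simp) (by simp),
      endswith_key u "_SITUACAO" "SITUACAO".toList (by simp) (by simp),
      endswith_key u "_UF" "UF".toList (by simp) (by simp)]
  by_cases hm : '_' ∈ u
  · simp only [hm, decide_true, Bool.true_and, ne_eq, reduceCtorEq,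
      not_false_eq_true, if_true, List.singleton_append, tailOf]
    rfl
  · simp [hm]
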